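-- pv_equiv track=rewrite | github.com/jiaqingxie/OmniGen | filter_double_bond_only.py | has_cc_double_bond
-- ===== SOURCE A (Python) =====
-- def has_cc_double_bond(smiles):
--     """
--     检查SMILES是否包含碳碳双键(C=C)
--     排除 C=O, C=N 等非碳碳双键
--     """
--     if not smiles:
--         return False
--
--     # 查找所有 = 的位置
--     i = 0
--     while i < len(smiles):
--         if smiles[i] == '=':
--             # 检查前后字符
--             if i > 0 and i < len(smiles) - 1:
--                 before = smiles[i-1]
--                 after = smiles[i+1]
--
--                 # 检查是否是 C=C
--                 if before.upper() == 'C' and after.upper() == 'C':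
--                     # 排除 C(=O) 等情况
--                     if i > 1 and smiles[i-2] == '(':
--                         # 可能是 C(=O)，检查括号后的原子
--                         if after.upper() in ['O', 'N', 'S', 'P', 'F']:
--                             i += 1
--                             continue
--                     # 检查是否是 /C=C/ 或 \C=C\ (立体化学标记)
--                     if i > 1 and i < len(smiles) - 2:
--                         if (smiles[i-2] in ['/', '\\'] and smiles[i+2] in ['/', '\\']):
--                             return True
--                     # 其他 C=C 情况
--                     return True
--
--                 # 检查 [...]C=C 或 C=C[...] (方括号内的原子)
--                 if before == ']' and after.upper() == 'C':
--                     return True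
--                 if before.upper() == 'C' and after == '[':
--                     return True
--
--         i += 1
--
--     return False
-- ===== SOURCE B (Python) =====
-- import re
--
-- # A's '=' neighbor scan reduces to one pattern search: an interior '=' whose
-- # neighbors form C=C (case-insensitive), ]=C, or C=[ — A's C(=O) exclusion is
-- # dead (it requires after to be both 'C' and in O/N/S/P/F) and its stereo
-- # branch also returns True.
-- _CC_RE = re.compile(r'[Cc]=[Cc]|\]=[Cc]|[Cc]=\[')
--
-- def has_cc_double_bond(smiles):
--     return bool(_CC_RE.search(smiles))
-- ===== Notes on version B (the rewrite author's own statement) =====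
-- stated objective: idiomatic
-- what changed: A's manual index-by-index neighbor inspection around each '=' (with a dead C(=O)-exclusion branch and a redundant stereo branch) is replaced by a single regex search for the alternation [Cc]=[Cc]|\]=[Cc]|[Cc]=\[, returning whether it matches.
import Mathlib
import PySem

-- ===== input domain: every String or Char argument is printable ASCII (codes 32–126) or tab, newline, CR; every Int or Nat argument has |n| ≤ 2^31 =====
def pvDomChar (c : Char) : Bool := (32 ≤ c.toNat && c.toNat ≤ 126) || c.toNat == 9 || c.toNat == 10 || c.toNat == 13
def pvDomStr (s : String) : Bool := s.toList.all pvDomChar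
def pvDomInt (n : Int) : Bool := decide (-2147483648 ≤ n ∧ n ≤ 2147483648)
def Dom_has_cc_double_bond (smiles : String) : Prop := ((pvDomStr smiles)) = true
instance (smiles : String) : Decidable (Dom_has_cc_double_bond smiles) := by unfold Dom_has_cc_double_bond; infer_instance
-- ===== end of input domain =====

-- B replaces A's manual neighbor inspection around each '=' by one regex-style
-- pattern search ([Cc]=[Cc] | ]=[Cc] | [Cc]=[ ), ported as a 3-char window scan.

-- ===== PORT A =====
-- literal transliteration of A's while-loop over indices; indexing via List.getD
-- (every access is guarded in range by the same conditions Python checks first)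
def aLoop (cs : List Char) (i : Nat) : Bool :=
  if hi : i < cs.length then
    if cs.getD i ' ' = '=' then
      if 0 < i ∧ i < cs.length - 1 then
        let before := cs.getD (i - 1) ' '
        let after := cs.getD (i + 1) ' '
        if PySem.Chars.upperChar before = 'C' ∧ PySem.Chars.upperChar after = 'C' then
          -- C(=O)-style exclusion, then stereo /C=C/ check, then plain C=C
          if (1 < i ∧ cs.getD (i - 2) ' ' = '(') ∧
              PySem.Chars.upperChar after ∈ (['O', 'N', 'S', 'P', 'F'] : List Char) then
            aLoop cs (i + 1)
          else if (1 < i ∧ i < cs.length - 2) ∧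
              (cs.getD (i - 2) ' ' ∈ (['/', '\\'] : List Char) ∧
               cs.getD (i + 2) ' ' ∈ (['/', '\\'] : List Char)) then
            true
          else
            true
        else if before = ']' ∧ PySem.Chars.upperChar after = 'C' then
          true
        else if PySem.Chars.upperChar before = 'C' ∧ after = '[' then
          true
        else
          aLoop cs (i + 1)
      else
        aLoop cs (i + 1)
    else
      aLoop cs (i + 1)
  else
    false
termination_by cs.length - i

def has_cc_double_bond (smiles : String) : Bool :=
  if smiles.toList = [] then false else aLoop smiles.toList 0

-- ===== PORT B =====
-- character class [Cc]
def reClassC (c : Char) : Bool := c = 'C' || c = 'c'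

-- one alternative of the pattern at a 3-char window: [Cc]=[Cc] | \]=[Cc] | [Cc]=\[
def reTriple (a b c : Char) : Bool :=
  (reClassC a && b = '=' && reClassC c) ||
  (a = ']' && b = '=' && reClassC c) ||
  (reClassC a && b = '=' && c = '[')

-- re.search: try the pattern at every start position
def reSearch : List Char → Bool
  | a :: b :: c :: rest => reTriple a b c || reSearch (b :: c :: rest)
  | _ => false

def has_cc_double_bond_alt (smiles : String) : Bool :=
  reSearch smiles.toList

-- ===== PRECONDITION & SPEC =====
def Spec_has_cc_double_bond (smiles : String) (out : Bool) : Prop := out = has_cc_double_bond_alt smiles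
instance (smiles : String) (out : Bool) : Decidable (Spec_has_cc_double_bond smiles out) := by unfold Spec_has_cc_double_bond; infer_instance

-- ===== CLAIM (what is proved, stated in full; the proofs are below) =====
def Claim_equal_has_cc_double_bond : Prop := ∀ (smiles : String), Dom_has_cc_double_bond smiles → Spec_has_cc_double_bond smiles (has_cc_double_bond smiles)

-- ===== LEMMAS AND PROOFS =====

theorem char_toNat_inj {a b : Char} (h : a.toNat = b.toNat) : a = b :=
  Char.ext (UInt32.toNat_inj.mp h)

theorem upper_eq_C (c : Char) : (PySem.Chars.upperChar c = 'C') ↔ (c = 'C' ∨ c = 'c') := by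
  unfold PySem.Chars.upperChar PySem.Chars.islower
  by_cases h : ('a' ≤ c ∧ c ≤ 'z')
  · obtain ⟨h1, h2⟩ := h
    have h1' : (97 : Nat) ≤ c.toNat := by
      rw [Char.le_def, UInt32.le_iff_toNat_le] at h1; exact h1
    have h2' : c.toNat ≤ 122 := by
      rw [Char.le_def, UInt32.le_iff_toNat_le] at h2; exact h2
    have hv : (c.toNat - 32).isValidChar := Or.inl (by omega)
    rw [if_pos (by simp [h1, h2])]
    have hn : (Char.ofNat (c.toNat - 32)).toNat = c.toNat - 32 := by
      simp only [Char.ofNat, dif_pos hv]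
      exact Char.toNat_ofNatAux hv
    constructor
    · intro hh
      have hx : (Char.ofNat (c.toNat - 32)).toNat = ('C' : Char).toNat := by rw [hh]
      rw [hn, show ('C' : Char).toNat = 67 from rfl] at hx
      right
      apply char_toNat_inj
      rw [show ('c' : Char).toNat = 99 from rfl]
      omega
    · rintro (rfl | rfl)
      · exact absurd h1' (by decide)
      · decide
  · rw [if_neg (by simpa using fun ha hz => h ⟨ha, hz⟩)]
    constructor
    · exact Or.inl
    · rintro (rfl | rfl)
      · rfl
      · exact absurd ⟨by decide, by decide⟩ h

theorem classC_iff (c : Char) : reClassC c = true ↔ PySem.Chars.upperChar c = 'C' := by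
  rw [upper_eq_C]; simp [reClassC]

theorem reSearch_short (l : List Char) (h : l.length ≤ 2) : reSearch l = false := by
  match l with
  | [] => rfl
  | [_] => rfl
  | [_, _] => rfl
  | _ :: _ :: _ :: _ => simp at h

-- the body of A's '='-branch equals "pattern matches here OR keep scanning"
theorem scanBody (P Q : Prop) [Decidable P] [Decidable Q] (a c : Char) (k : Bool) :
    (if PySem.Chars.upperChar a = 'C' ∧ PySem.Chars.upperChar c = 'C' then
       if P ∧ PySem.Chars.upperChar c ∈ (['O', 'N', 'S', 'P', 'F'] : List Char) then k
       else if Q then true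
       else true
     else if a = ']' ∧ PySem.Chars.upperChar c = 'C' then true
     else if PySem.Chars.upperChar a = 'C' ∧ c = '[' then true
     else k) = (reTriple a '=' c || k) := by
  by_cases hb : PySem.Chars.upperChar a = 'C' <;> by_cases ha : PySem.Chars.upperChar c = 'C'
  · rw [if_pos ⟨hb, ha⟩, if_neg (by rw [ha]; rintro ⟨-, hm⟩; simp at hm),
      show reTriple a '=' c = true by
        simp [reTriple, (classC_iff a).mpr hb, (classC_iff c).mpr ha]]
    simp
  · rw [if_neg (by rintro ⟨-, h⟩; exact ha h), if_neg (by rintro ⟨-, h⟩; exact ha h)]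
    have hcC : reClassC c = false := by
      rcases hrc : reClassC c with _ | _
      · rfl
      · exact absurd ((classC_iff c).mp hrc) ha
    by_cases hc : c = '['
    · rw [if_pos ⟨hb, hc⟩,
        show reTriple a '=' c = true by simp [reTriple, (classC_iff a).mpr hb, hc]]
      simp
    · rw [if_neg (by rintro ⟨-, h⟩; exact hc h),
        show reTriple a '=' c = false by simp [reTriple, hcC, hc]]
      simp
  · rw [if_neg (by rintro ⟨h, -⟩; exact hb h)]
    have haC : reClassC a = false := by
      rcases hrc : reClassC a with _ | _
      · rfl
      · exact absurd ((classC_iff a).mp hrc) hb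
    by_cases hj : a = ']'
    · rw [if_pos ⟨hj, ha⟩,
        show reTriple a '=' c = true by simp [reTriple, hj, (classC_iff c).mpr ha]]
      simp
    · rw [if_neg (by rintro ⟨h, -⟩; exact hj h), if_neg (by rintro ⟨h, -⟩; exact hb h),
        show reTriple a '=' c = false by simp [reTriple, haC, hj]]
      simp
  · rw [if_neg (by rintro ⟨h, -⟩; exact hb h), if_neg (by rintro ⟨-, h⟩; exact ha h),
      if_neg (by rintro ⟨h, -⟩; exact hb h)]
    have haC : reClassC a = false := by
      rcases hrc : reClassC a with _ | _
      · rfl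
      · exact absurd ((classC_iff a).mp hrc) hb
    by_cases hj : a = ']'
    · rw [show reTriple a '=' c = false by
        simp [reTriple, haC]
        rcases hrc : reClassC c with _ | _
        · simp
        · exact absurd ((classC_iff c).mp hrc) ha]
      simp
    · rw [show reTriple a '=' c = false by
        simp [reTriple, haC, hj]]
      simp

theorem aLoop_eq_reSearch (cs : List Char) :
    ∀ n i, 1 ≤ i → cs.length - i ≤ n → aLoop cs i = reSearch (cs.drop (i - 1)) := by
  intro n
  induction n with
  | zero =>
    intro i h1 hle
    rw [aLoop, dif_neg (by omega)]
    rw [reSearch_short _ (by simp; omega)]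
  | succ n ih =>
    intro i h1 hle
    by_cases hi : i < cs.length
    · have hgi : cs.getD i ' ' = cs[i] := List.getD_eq_getElem cs ' ' hi
      have hgm : cs.getD (i - 1) ' ' = cs[i - 1]'(by omega) := List.getD_eq_getElem cs ' ' (by omega)
      have e1 : cs.drop (i - 1) = cs[i - 1]'(by omega) :: cs.drop i :=
        (List.drop_eq_getElem_cons (by omega)).trans (by rw [Nat.sub_add_cancel h1])
      have e2 : cs.drop i = cs[i] :: cs.drop (i + 1) := List.drop_eq_getElem_cons hi
      have ih' : aLoop cs (i + 1) = reSearch (cs.drop i) := by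
        have := ih (i + 1) (by omega) (by omega)
        simpa using this
      by_cases h2 : i + 1 < cs.length
      · have hgp : cs.getD (i + 1) ' ' = cs[i + 1] := List.getD_eq_getElem cs ' ' h2
        have e3 : cs.drop (i + 1) = cs[i + 1] :: cs.drop (i + 2) := List.drop_eq_getElem_cons h2
        have hr : reSearch (cs.drop (i - 1)) =
            (reTriple (cs[i - 1]'(by omega)) cs[i] cs[i + 1] || reSearch (cs.drop i)) := by
          conv_lhs => rw [e1, e2, e3]
          rw [reSearch, ← e3, ← e2]
        rw [aLoop, dif_pos hi, hgi, hgm, hgp]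
        by_cases hEq : cs[i] = '='
        · rw [if_pos hEq, if_pos ⟨h1, by omega⟩]
          simp only []
          rw [scanBody, hr, ih', hEq]
        · rw [if_neg hEq, ih', hr,
            show reTriple (cs[i - 1]'(by omega)) cs[i] cs[i + 1] = false by
              simp [reTriple, hEq]]
          simp
      · have hint : ¬(0 < i ∧ i < cs.length - 1) := by omega
        rw [aLoop, dif_pos hi, if_neg hint, ite_self, ih',
          reSearch_short (cs.drop i) (by simp; omega),
          reSearch_short (cs.drop (i - 1)) (by simp; omega)]
    · rw [aLoop, dif_neg hi, reSearch_short _ (by simp; omega)]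

theorem ports_agree (s : String) : has_cc_double_bond s = has_cc_double_bond_alt s := by
  unfold has_cc_double_bond has_cc_double_bond_alt
  by_cases h : s.toList = []
  · rw [if_pos h, h]; rfl
  · rw [if_neg h]
    have hlen : 0 < s.toList.length := List.length_pos_iff.mpr h
    have hint : ¬((0 : Nat) < 0 ∧ 0 < s.toList.length - 1) := by omega
    have h0 : aLoop s.toList 0 = aLoop s.toList 1 := by
      rw [aLoop, dif_pos hlen, if_neg hint, ite_self]
    rw [h0, aLoop_eq_reSearch s.toList (s.toList.length - 1) 1 le_rfl (by omega)]
    simp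

-- ===== VERDICT (by name: the statement is the Claim_ definition above) =====
theorem has_cc_double_bond_spec : Claim_equal_has_cc_double_bond := by
  intro s _
  unfold Spec_has_cc_double_bond
  exact ports_agree s
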